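-- pv_equiv track=rewrite | github.com/zookeeper464/zookeeper-python | 코딩테스트/프로그래머스/level2/[3차] n진수 게임.py | solution
-- ===== SOURCE A (Python) =====
-- def solution(n, t, m, p):
--     from collections import deque
--
--     answer = ''
--     dp = ''
--     dic = {i:f'{i}' for i in range(16)}
--     for i in range(65,71):
--         dic[i-55] = chr(i)
--
--     for i in range(t*m):
--         if len(dp)>t*m: break
--
--         temp,cnt = deque(),i
--         while True:
--             temp.appendleft(dic[cnt%n])
--             cnt //= n
--             if cnt == 0: break
--         dp += ''.join(list(temp))
--
--     for i in range(t):
--         answer += dp[i*m+p-1]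
--
--     return answer
-- ===== SOURCE B (Python) =====
-- def solution(n, t, m, p):
--     digits = "0123456789ABCDEF"
--     out = []
--     for i in range(t):
--         k = i * m + p - 1          # 0-based position in the infinite digit stream
--         d = 1                      # digit-length of the current block
--         first = 0                  # first number with d digits
--         count = n                  # how many numbers have d digits
--         while k >= d * count:      # skip whole blocks of d-digit numbers
--             k -= d * count
--             d += 1
--             first = n ** (d - 1)
--             count = (n - 1) * n ** (d - 1)
--         q, r = divmod(k, d)        # q-th number of the block, its r-th digit
--         num = first + q
--         out.append(digits[(num // n ** (d - 1 - r)) % n])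
--     return ''.join(out)
-- ===== Notes on version B (the rewrite author's own statement) =====
-- stated objective: faster
-- what changed: Instead of concatenating the base-n strings of 0,1,2,... into a buffer of ~t*m characters and indexing it, B decodes each of the t requested stream positions directly: it skips whole digit-length blocks arithmetically, identifies which number and which digit the position falls on, and extracts that digit by division, never building the stream.
-- outside the precondition, e.g. on solution(2, 1, 1, 0): A returns '0', B returns '1'; on solution(2, 2, 2, 4): A returns '01', B returns '01'; on solution(0, 0, -1, 1): A returns '', B returns ''
import Mathlib
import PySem

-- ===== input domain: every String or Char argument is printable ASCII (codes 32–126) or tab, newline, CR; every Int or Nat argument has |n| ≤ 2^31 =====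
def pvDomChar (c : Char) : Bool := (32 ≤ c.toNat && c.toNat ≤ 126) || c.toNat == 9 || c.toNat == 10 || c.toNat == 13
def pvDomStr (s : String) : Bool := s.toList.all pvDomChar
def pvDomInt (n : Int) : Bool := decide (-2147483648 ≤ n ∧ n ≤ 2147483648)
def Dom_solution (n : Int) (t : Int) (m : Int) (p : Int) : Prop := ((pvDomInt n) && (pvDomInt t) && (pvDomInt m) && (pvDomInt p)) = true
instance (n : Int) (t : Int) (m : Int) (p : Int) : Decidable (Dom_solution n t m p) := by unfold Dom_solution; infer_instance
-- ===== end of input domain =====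

-- B replaces A's "concatenate the base-n strings of 0,1,2,… and index the buffer" by direct
-- positional decoding of each requested stream position (skip digit-length blocks, then extract
-- one digit arithmetically), so the t*m-character buffer is never built.

-- ===== PORT A =====
-- dic = {i: f'{i}' for i in range(16)}; for i in range(65, 71): dic[i-55] = chr(i)
def solDic : PySem.Dict Int String :=
  let d := (PySem.List.pyRange 0 16 1).foldl (fun d i => d.insert i (PySem.Int.toStr i)) PySem.Dict.empty
  (PySem.List.pyRange 65 71 1).foldl (fun d i => d.insert (i - 55) (String.ofList [Char.ofNat i.toNat])) d

-- while True: temp.appendleft(dic[cnt % n]); cnt //= n; if cnt == 0: break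
-- (fuel only makes the while-loop total; inside Pre_ it is never exhausted.  dic[…] is getD:
-- inside Pre_ the key 0 ≤ cnt % n < n ≤ 16 is always present.)
def solDigits (n : Int) : Nat → Int → List String → List String
  | 0, _, temp => temp
  | fuel+1, cnt, temp =>
    let temp' := (solDic.getD (PySem.Int.mod cnt n) "") :: temp
    let cnt' := PySem.Int.floordiv cnt n
    if cnt' = 0 then temp' else solDigits n fuel cnt' temp'

-- for i in range(t*m): if len(dp) > t*m: break; …; dp += ''.join(list(temp))
def solDp (n tm : Int) : List Int → List Char → List Char
  | [], dp => dp
  | i :: rest, dp =>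
    if (dp.length : Int) > tm then dp
    else solDp n tm rest (dp ++ (PySem.Str.join "" (solDigits n 100 i [])).toList)

-- for i in range(t): answer += dp[i*m+p-1]  (dp[…] is pyGetD: in range inside Pre_)
def solution (n : Int) (t : Int) (m : Int) (p : Int) : String :=
  let dp := solDp n (t*m) (PySem.List.pyRange 0 (t*m) 1) []
  String.ofList ((PySem.List.pyRange 0 t 1).foldl
    (fun acc i => acc ++ [PySem.List.pyGetD dp (i*m+p-1) ' ']) ([] : List Char))

-- ===== PORT B =====
-- while k >= d*count: k -= d*count; d += 1; first = n**(d-1); count = (n-1)*n**(d-1)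
-- (fuel only makes the while-loop total; inside Pre_ it is never exhausted)
def altWalk (n : Int) : Nat → Int → Int → Int → Int → Int × Int × Int
  | 0, k, d, first, _ => (k, d, first)
  | fuel+1, k, d, first, count =>
    if k < d * count then (k, d, first)
    else altWalk n fuel (k - d * count) (d + 1) (n ^ d.toNat) ((n - 1) * n ^ d.toNat)

-- digits[…] is pyGet?.getD: the index is 0 ≤ _ % n < n ≤ 16 inside Pre_
def solution_alt (n : Int) (t : Int) (m : Int) (p : Int) : String :=
  String.ofList ((PySem.List.pyRange 0 t 1).foldl (fun acc i =>
    let kdf := altWalk n 100 (i * m + p - 1) 1 0 n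
    let q := PySem.Int.floordiv kdf.1 kdf.2.1
    let r := PySem.Int.mod kdf.1 kdf.2.1
    let num := kdf.2.2 + q
    acc ++ [(PySem.Str.pyGet? "0123456789ABCDEF"
      (PySem.Int.mod (PySem.Int.floordiv num (n ^ (kdf.2.1 - 1 - r).toNat)) n)).getD ' ']) ([] : List Char))

-- ===== PRECONDITION & SPEC =====
-- Pre_ keeps the problem's contract (n ≥ 2 with every produced digit below 16, t ≥ 1,
-- 1 ≤ p ≤ m) plus the trivially-empty corners with t ≤ 0 (both return "").  Outside it A
-- variously raises (KeyError for a digit value ≥ 16, IndexError when p > m overshoots dp,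
-- ZeroDivisionError) or hangs (n = 1), or returns only through accidents of its buffer:
-- negative-index wraparound for p ≤ 0, or a lucky overshoot of dp for p > m — corners no
-- statement of the task specifies.
def Pre_solution (n : Int) (t : Int) (m : Int) (p : Int) : Prop :=
  (2 ≤ n ∧ (n ≤ 16 ∨ t * m ≤ 16) ∧ 1 ≤ t ∧ 1 ≤ m ∧ 1 ≤ p ∧ p ≤ m) ∨
  (t ≤ 0 ∧ (0 ≤ m ∨ (2 ≤ n ∧ (n ≤ 16 ∨ t * m ≤ 16))))
instance (n : Int) (t : Int) (m : Int) (p : Int) : Decidable (Pre_solution n t m p) := by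
  unfold Pre_solution; infer_instance
def pvWitness_solution : Int × Int × Int × Int := (2, 3, 2, 1)

def Spec_solution (n : Int) (t : Int) (m : Int) (p : Int) (out : String) : Prop := out = solution_alt n t m p
instance (n : Int) (t : Int) (m : Int) (p : Int) (out : String) : Decidable (Spec_solution n t m p out) := by unfold Spec_solution; infer_instance

-- ===== CLAIM (what is proved, stated in full; the proofs are below) =====
def Claim_equal_solution : Prop := ∀ (n : Int) (t : Int) (m : Int) (p : Int), Dom_solution n t m p → Pre_solution n t m p → Spec_solution n t m p (solution n t m p)

-- ===== LEMMAS AND PROOFS =====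

-- ideal most-significant-first base-N digit list of c (do-while: 0 has one digit)
def dL (N : Nat) (c : Nat) : List Nat :=
  if h : N ≤ 1 ∨ c < N then [c % N]
  else dL N (c / N) ++ [c % N]
termination_by c
decreasing_by
  exact Nat.div_lt_self (by omega) (by omega)

def digitChar (v : Nat) : Char := if v < 10 then Char.ofNat (48 + v) else Char.ofNat (55 + v)

-- the concatenation of the digit strings of 0,1,…,j-1 (what A's dp buffer is a prefix-run of)
def prefixC (N j : Nat) : List Char := (List.range j).flatMap (fun c => (dL N c).map digitChar)

-- Nat mirror of B's block walk
def walkN (N : Nat) : Nat → Nat → Nat → Nat → Nat → Nat × Nat × Nat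
  | 0, k, d, first, _ => (k, d, first)
  | fuel+1, k, d, first, count =>
    if k < d * count then (k, d, first)
    else walkN N fuel (k - d * count) (d + 1) (N ^ d) ((N - 1) * N ^ d)

def blockFirst (N d : Nat) : Nat := if d = 1 then 0 else N ^ (d - 1)
def blockCnt (N d : Nat) : Nat := if d = 1 then N else (N - 1) * N ^ (d - 1)
def blockS (N : Nat) : Nat → Nat
  | 0 => 0
  | d+1 => blockS N d + d * blockCnt N d

theorem dL_low {N c : Nat} (h : c < N) : dL N c = [c % N] := by
  rw [dL]; simp [Or.inr h]

theorem dL_high {N c : Nat} (hN : 2 ≤ N) (h : N ≤ c) : dL N c = dL N (c / N) ++ [c % N] := by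
  rw [dL]; rw [dif_neg (by omega)]

theorem dL_length_pos {N c : Nat} : 1 ≤ (dL N c).length := by
  rw [dL]; split <;> simp

-- the port's fuelled digit loop computes dL once the fuel covers the digit count
theorem solDigits_eq_dL {N : Nat} (hN : 2 ≤ N)
    (dic16 : ∀ v : Nat, v < 16 → solDic.getD (v : Int) "" = String.ofList [digitChar v]) :
    ∀ (f c : Nat) (temp : List String), N ≤ 16 ∨ c < 16 → c < N ^ (f + 1) →
      solDigits (N : Int) (f + 1) (c : Int) temp
        = (dL N c).map (fun v => String.ofList [digitChar v]) ++ temp := by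
  intro f
  induction f with
  | zero =>
    intro c temp hd hc
    have hkey : c % N < 16 := by
      rcases hd with h16 | h16
      · have := Nat.mod_lt c (show 0 < N by omega); omega
      · have := Nat.mod_le c N; omega
    have hcN : c < N := by simpa using hc
    have hdiv : c / N = 0 := Nat.div_eq_of_lt hcN
    simp only [solDigits, PySem.Int.mod_natCast, PySem.Int.floordiv_natCast, hdiv,
      dic16 (c % N) hkey]
    rw [dL_low hcN]
    simp
  | succ f ih =>
    intro c temp hd hc
    have hkey : c % N < 16 := by
      rcases hd with h16 | h16
      · have := Nat.mod_lt c (show 0 < N by omega); omega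
      · have := Nat.mod_le c N; omega
    by_cases hz : c / N = 0
    · have hcN : c < N := by
        rcases Nat.lt_or_ge c N with h | h
        · exact h
        · exact absurd hz (by have := Nat.div_ne_zero_iff.mpr ⟨by omega, h⟩; omega)
      simp only [solDigits, PySem.Int.mod_natCast, PySem.Int.floordiv_natCast, hz,
        dic16 (c % N) hkey]
      rw [dL_low hcN]
      simp
    · have hcN : N ≤ c := by
        rcases Nat.lt_or_ge c N with h | h
        · exact absurd (Nat.div_eq_of_lt h) hz
        · exact h
      have hlt : c / N < N ^ (f + 1) := by
        rw [Nat.div_lt_iff_lt_mul (by omega)]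
        calc c < N ^ (f + 1 + 1) := hc
        _ = N ^ (f + 1) * N := by ring
      have step : solDigits (N : Int) (f + 1 + 1) (c : Int) temp
          = solDigits (N : Int) (f + 1) ((c / N : Nat) : Int)
              (solDic.getD ((c % N : Nat) : Int) "" :: temp) := by
        simp only [solDigits, PySem.Int.mod_natCast, PySem.Int.floordiv_natCast]
        rw [if_neg (by exact_mod_cast hz)]
      have hd' : N ≤ 16 ∨ c / N < 16 := by
        rcases hd with h16 | h16
        · exact Or.inl h16
        · exact Or.inr (by have := Nat.div_le_self c N; omega)
      rw [step, ih (c / N) _ hd' hlt, dL_high hN hcN,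
        dic16 (c % N) hkey]
      simp

-- A's hand-built dict agrees with the hex digit map on the 16 keys it holds
theorem solDic_getD (v : Nat) (hv : v < 16) :
    solDic.getD (v : Int) "" = String.ofList [digitChar v] := by
  interval_cases v <;> rfl

-- B's literal digit string agrees with the hex digit map
theorem hexStr_get (v : Nat) (hv : v < 16) :
    (PySem.Str.pyGet? "0123456789ABCDEF" (v : Int)).getD ' ' = digitChar v := by
  interval_cases v <;> rfl

-- ''.join of single-character strings
theorem join_singleton_chars (l : List Nat) :
    (PySem.Str.join "" (l.map (fun v => String.ofList [digitChar v]))).toList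
      = l.map digitChar := by
  rw [PySem.Str.toList_join]
  have : (l.map (fun v => String.ofList [digitChar v])).map String.toList
      = (l.map digitChar).map (fun c => [c]) := by
    simp [List.map_map, Function.comp_def]
  simpa [this] using PySem.Chars.join_nil_singletons (l.map digitChar)

theorem prefixC_succ (N j : Nat) :
    prefixC N (j + 1) = prefixC N j ++ (dL N j).map digitChar := by
  simp [prefixC, List.range_succ]

theorem self_le_length_prefixC (N : Nat) : ∀ j, j ≤ (prefixC N j).length := by
  intro j
  induction j with
  | zero => simp [prefixC]
  | succ j ih =>
    rw [prefixC_succ]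
    have := dL_length_pos (N := N) (c := j)
    simp only [List.length_append, List.length_map]
    omega

-- digit-count bounds: c < N^len, and N^(len-1) ≤ c for multi-digit c
theorem dL_bounds {N : Nat} (hN : 2 ≤ N) :
    ∀ c, c < N ^ (dL N c).length ∧ (2 ≤ (dL N c).length → N ^ ((dL N c).length - 1) ≤ c) := by
  intro c
  induction c using Nat.strong_induction_on with
  | _ c ih =>
    rcases Nat.lt_or_ge c N with h | h
    · rw [dL_low h]; simpa using h
    · have hrec := ih (c / N) (Nat.div_lt_self (by omega) (by omega))
      rw [dL_high hN h]
      set e := (dL N (c / N)).length with he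
      have he1 : 1 ≤ e := dL_length_pos
      have hmod := Nat.div_add_mod c N
      have hm : c % N < N := Nat.mod_lt _ (by omega)
      constructor
      · have hx : N * (c / N + 1) = N * (c / N) + N := by ring
        have : c < N * (c / N + 1) := by omega
        calc c < N * (c / N + 1) := this
        _ ≤ N * N ^ e := by
            have h1 := hrec.1
            have : c / N + 1 ≤ N ^ e := by omega
            exact Nat.mul_le_mul_left N this
        _ = N ^ (e + 1) := by ring
        _ = N ^ (dL N (c / N) ++ [c % N]).length := by rw [he]; simp
      · intro _
        have hle : N ^ (e - 1) * N ≤ (c / N) * N := by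
          rcases Nat.lt_or_ge e 2 with h2 | h2
          · have he' : e = 1 := by omega
            have hq : 1 ≤ c / N := Nat.one_le_div_iff (by omega) |>.mpr h
            calc N ^ (e - 1) * N = N := by rw [he']; simp
            _ ≤ (c / N) * N := by nlinarith
          · exact Nat.mul_le_mul_right N (hrec.2 h2)
        have h1 : N ^ e ≤ (c / N) * N := by
          have hpe : N ^ (e - 1) * N = N ^ e := by
            rw [← pow_succ]; congr 1; omega
          calc N ^ e = N ^ (e - 1) * N := hpe.symm
          _ ≤ (c / N) * N := hle
        have h2 : (c / N) * N ≤ c := by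
          have := Nat.div_mul_le_self c N
          omega
        simp only [List.length_append, List.length_map, List.length_cons, List.length_nil]
        calc N ^ (e + 1 - 1) = N ^ e := by simp
        _ ≤ c := le_trans h1 h2

-- each block [blockFirst, N^d) of d-digit numbers ends where the next begins
theorem blockFirst_add_cnt {N : Nat} (hN : 2 ≤ N) (d : Nat) (hd : 1 ≤ d) :
    blockFirst N d + blockCnt N d = N ^ d := by
  unfold blockFirst blockCnt
  rcases Nat.eq_or_lt_of_le hd with h1 | h1
  · simp [← h1]
  · rw [if_neg (by omega), if_neg (by omega)]
    have hp : N ^ d = N ^ (d - 1) * N := by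
      rw [← pow_succ]; congr 1; omega
    obtain ⟨k, rfl⟩ := Nat.exists_eq_add_of_le hN
    rw [hp, show 2 + k - 1 = k + 1 from by omega]
    ring

-- the digit count is the unique d with blockFirst ≤ c < N^d
theorem dL_length_eq {N : Nat} (hN : 2 ≤ N) {c d : Nat} (hd : 1 ≤ d)
    (h1 : blockFirst N d ≤ c) (h2 : c < N ^ d) : (dL N c).length = d := by
  obtain ⟨hb1, hb2⟩ := dL_bounds hN c
  have hD1 : 1 ≤ (dL N c).length := dL_length_pos
  by_contra hne
  rcases Nat.lt_or_ge (dL N c).length d with hlt | hge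
  · have hd2 : 2 ≤ d := by omega
    have hpow : N ^ (dL N c).length ≤ N ^ (d - 1) :=
      Nat.pow_le_pow_right (by omega) (by omega)
    have hf : blockFirst N d = N ^ (d - 1) := by unfold blockFirst; rw [if_neg (by omega)]
    omega
  · have hD2 : 2 ≤ (dL N c).length := by omega
    have hpow : N ^ d ≤ N ^ ((dL N c).length - 1) :=
      Nat.pow_le_pow_right (by omega) (by omega)
    have := hb2 hD2
    omega

theorem blockS_mono {N : Nat} : ∀ {d e : Nat}, d ≤ e → blockS N d ≤ blockS N e := by
  intro d e h
  induction e with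
  | zero => simp_all
  | succ e ih =>
    rcases Nat.eq_or_lt_of_le h with h1 | h1
    · exact h1 ▸ le_rfl
    · calc blockS N d ≤ blockS N e := ih (by omega)
      _ ≤ blockS N (e + 1) := by simp [blockS]

-- buffer length formula: chars before number j = chars of full blocks + position inside j's block
theorem length_prefixC_eq {N : Nat} (hN : 2 ≤ N) :
    ∀ j, blockFirst N (dL N j).length ≤ j ∧
      (prefixC N j).length
        = blockS N (dL N j).length + (j - blockFirst N (dL N j).length) * (dL N j).length := by
  intro j
  induction j with
  | zero =>
    rw [show (dL N 0).length = 1 from by rw [dL_low (by omega)]; rfl]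
    simp [prefixC, blockFirst, blockS]
  | succ j ih =>
    obtain ⟨hfl, hlen⟩ := ih
    have hD1 : 1 ≤ (dL N j).length := dL_length_pos
    have hjD : j < N ^ (dL N j).length := (dL_bounds hN j).1
    have hstep : (prefixC N (j + 1)).length = (prefixC N j).length + (dL N j).length := by
      rw [prefixC_succ]; simp
    rcases Nat.lt_or_ge (j + 1) (N ^ (dL N j).length) with hc | hc
    · have hnew : (dL N (j + 1)).length = (dL N j).length :=
        dL_length_eq hN hD1 (by omega) hc
      rw [hnew]
      refine ⟨by omega, ?_⟩
      rw [hstep, hlen]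
      rw [show j + 1 - blockFirst N (dL N j).length
          = (j - blockFirst N (dL N j).length) + 1 from by omega]
      ring
    · have hceq : j + 1 = N ^ (dL N j).length := by omega
      have hfirst : blockFirst N ((dL N j).length + 1) = N ^ (dL N j).length := by
        unfold blockFirst; rw [if_neg (by omega)]; simp
      have hnew : (dL N (j + 1)).length = (dL N j).length + 1 := by
        refine dL_length_eq hN (by omega) (by omega) ?_
        calc j + 1 = N ^ (dL N j).length := hceq
        _ < N ^ ((dL N j).length + 1) := Nat.pow_lt_pow_right (by omega) (by omega)
      rw [hnew, hfirst]
      refine ⟨by omega, ?_⟩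
      rw [hstep, hlen]
      have hbc := blockFirst_add_cnt hN (dL N j).length hD1
      have hcpos : 1 ≤ blockCnt N (dL N j).length := by omega
      have h1 : j + 1 - N ^ (dL N j).length = 0 := by omega
      have h2 : j - blockFirst N (dL N j).length = blockCnt N (dL N j).length - 1 := by omega
      rw [h1, h2]
      have h3 : (blockCnt N (dL N j).length - 1) * (dL N j).length + (dL N j).length
          = blockCnt N (dL N j).length * (dL N j).length := by
        calc (blockCnt N (dL N j).length - 1) * (dL N j).length + (dL N j).length
            = (blockCnt N (dL N j).length - 1 + 1) * (dL N j).length := by ring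
        _ = blockCnt N (dL N j).length * (dL N j).length := by
            rw [show blockCnt N (dL N j).length - 1 + 1
              = blockCnt N (dL N j).length from by omega]
      calc blockS N (dL N j).length
            + (blockCnt N (dL N j).length - 1) * (dL N j).length + (dL N j).length
          = blockS N (dL N j).length
            + blockCnt N (dL N j).length * (dL N j).length := by omega
      _ = blockS N ((dL N j).length + 1) + 0 * ((dL N j).length + 1) := by
          simp [blockS]; ring

-- the Nat walk lands on block D when started on block d, given enough fuel
theorem walkN_spec {N : Nat} (hN : 2 ≤ N) :
    ∀ (f d D k0 : Nat), 1 ≤ d → d ≤ D → D ≤ f + d → k0 < D * blockCnt N D →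
      walkN N f (blockS N D + k0 - blockS N d) d (blockFirst N d) (blockCnt N d)
        = (k0, D, blockFirst N D) := by
  intro f
  induction f with
  | zero =>
    intro d D k0 h1 h2 h3 h4
    have : d = D := by omega
    subst this
    simp [walkN]
  | succ f ih =>
    intro d D k0 h1 h2 h3 h4
    rcases Nat.eq_or_lt_of_le h2 with he | hlt
    · subst he
      have hk : blockS N d + k0 - blockS N d = k0 := by omega
      simp only [walkN, hk]
      rw [if_pos h4]
    · have hS : blockS N (d + 1) = blockS N d + d * blockCnt N d := rfl
      have hmono : blockS N (d + 1) ≤ blockS N D := blockS_mono (by omega)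
      have hmono' : blockS N d ≤ blockS N d + d * blockCnt N d := by omega
      have hge : ¬ (blockS N D + k0 - blockS N d < d * blockCnt N d) := by omega
      simp only [walkN]
      rw [if_neg hge]
      have harg : blockS N D + k0 - blockS N d - d * blockCnt N d
          = blockS N D + k0 - blockS N (d + 1) := by omega
      have hf1 : blockFirst N (d + 1) = N ^ d := by
        unfold blockFirst; rw [if_neg (by omega)]; simp
      have hc1 : blockCnt N (d + 1) = (N - 1) * N ^ d := by
        unfold blockCnt; rw [if_neg (by omega)]; simp
      rw [harg]
      rw [show ((N - 1) * N ^ d : Nat) = blockCnt N (d + 1) from hc1.symm,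
        show (N ^ d : Nat) = blockFirst N (d + 1) from hf1.symm]
      exact ih (d + 1) D k0 (by omega) (by omega) (by omega) h4

-- digit extraction: the r-th (most-significant-first) digit of c is c / N^(len-1-r) % N
theorem dL_getElem {N : Nat} (hN : 2 ≤ N) :
    ∀ c r (h : r < (dL N c).length),
      (dL N c)[r] = c / N ^ ((dL N c).length - 1 - r) % N := by
  intro c
  induction c using Nat.strong_induction_on with
  | _ c ih =>
    intro r h
    rcases Nat.lt_or_ge c N with hc | hc
    · have hl : dL N c = [c % N] := dL_low hc
      have : r = 0 := by
        have := h; rw [hl] at this; simpa using this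
      subst this
      simp [hl, Nat.lt_irrefl]
    · have hl : dL N c = dL N (c / N) ++ [c % N] := dL_high hN hc
      have hlen : (dL N c).length = (dL N (c / N)).length + 1 := by rw [hl]; simp
      rcases Nat.lt_or_ge r (dL N (c / N)).length with hr1 | hr1
      · have hg : (dL N c)[r] = (dL N (c / N))[r]'hr1 := by
          simp only [hl]
          exact List.getElem_append_left hr1
        rw [hg, ih (c / N) (Nat.div_lt_self (by omega) (by omega)) r hr1, hlen]
        rw [show (dL N (c / N)).length + 1 - 1 - r
          = ((dL N (c / N)).length - 1 - r) + 1 from by omega]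
        rw [Nat.div_div_eq_div_mul, ← pow_succ']
      · have hre : r = (dL N (c / N)).length := by omega
        subst hre
        have hg : (dL N c)[(dL N (c / N)).length]'h = c % N := by
          simp [hl]
        rw [hg, hlen]
        simp

-- B's walk, started at a stream position decomposed as "chars before number j, plus r", lands
-- exactly on j's block
theorem walkN_at {N : Nat} (hN : 2 ≤ N) (j r : Nat) (hr : r < (dL N j).length)
    (hj : j < N ^ 100) :
    walkN N 100 ((prefixC N j).length + r) 1 0 N
      = ((j - blockFirst N (dL N j).length) * (dL N j).length + r,
         (dL N j).length, blockFirst N (dL N j).length) := by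
  obtain ⟨hfl, hlen⟩ := length_prefixC_eq hN j
  have hD1 : 1 ≤ (dL N j).length := dL_length_pos
  have hjD : j < N ^ (dL N j).length := (dL_bounds hN j).1
  have hbc := blockFirst_add_cnt hN (dL N j).length hD1
  have hq : j - blockFirst N (dL N j).length < blockCnt N (dL N j).length := by omega
  have hk0 : (j - blockFirst N (dL N j).length) * (dL N j).length + r
      < (dL N j).length * blockCnt N (dL N j).length := by
    calc (j - blockFirst N (dL N j).length) * (dL N j).length + r
        < (j - blockFirst N (dL N j).length) * (dL N j).length + (dL N j).length := by omega
    _ = ((j - blockFirst N (dL N j).length) + 1) * (dL N j).length := by ring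
    _ ≤ blockCnt N (dL N j).length * (dL N j).length := Nat.mul_le_mul_right _ (by omega)
    _ = (dL N j).length * blockCnt N (dL N j).length := Nat.mul_comm _ _
  have hD100 : (dL N j).length ≤ 100 := by
    by_contra hgt
    have h2 : 2 ≤ (dL N j).length := by omega
    have := (dL_bounds hN j).2 h2
    have : N ^ 100 ≤ N ^ ((dL N j).length - 1) := Nat.pow_le_pow_right (by omega) (by omega)
    omega
  have h0 : blockS N 1 = 0 := by simp [blockS]
  have hstart : (prefixC N j).length + r
      = blockS N (dL N j).length
        + ((j - blockFirst N (dL N j).length) * (dL N j).length + r) - blockS N 1 := by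
    rw [h0, hlen]; omega
  rw [hstart, show (0 : Nat) = blockFirst N 1 from by simp [blockFirst],
    show (N : Nat) = blockCnt N 1 from by simp [blockCnt]]
  exact walkN_spec hN 100 1 (dL N j).length _ (by omega) hD1 (by omega) hk0

-- every position below the buffer of j numbers is "chars before some c < j, plus r"
theorem exists_decomp {N : Nat} :
    ∀ j k, k < (prefixC N j).length →
      ∃ c r, c < j ∧ r < (dL N c).length ∧ k = (prefixC N c).length + r := by
  intro j
  induction j with
  | zero => intro k hk; simp [prefixC] at hk
  | succ j ih =>
    intro k hk
    rcases Nat.lt_or_ge k (prefixC N j).length with h | h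
    · obtain ⟨c, r, h1, h2, h3⟩ := ih k h
      exact ⟨c, r, by omega, h2, h3⟩
    · refine ⟨j, k - (prefixC N j).length, by omega, ?_, by omega⟩
      have := hk
      rw [prefixC_succ] at this
      simp only [List.length_append, List.length_map] at this
      omega

theorem prefixC_append_of_le {N : Nat} {c j : Nat} (h : c ≤ j) :
    ∃ s, prefixC N j = prefixC N c ++ s := by
  induction j with
  | zero => exact ⟨[], by simp_all⟩
  | succ j ih =>
    rcases Nat.eq_or_lt_of_le h with h1 | h1
    · exact ⟨[], by rw [h1]; simp⟩
    · obtain ⟨s, hs⟩ := ih (by omega)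
      exact ⟨s ++ (dL N j).map digitChar, by rw [prefixC_succ, hs, List.append_assoc]⟩

-- the character of the stream at position "chars before c, plus r" is c's r-th digit
theorem prefixC_getElem {N : Nat} (hN : 2 ≤ N) {c r j : Nat} (hcj : c < j)
    (hr : r < (dL N c).length) (hk : (prefixC N c).length + r < (prefixC N j).length) :
    (prefixC N j)[(prefixC N c).length + r] = digitChar ((dL N c)[r]) := by
  obtain ⟨s, hs⟩ := prefixC_append_of_le (show c + 1 ≤ j from hcj)
  have hlen1 : (prefixC N (c + 1)).length = (prefixC N c).length + (dL N c).length := by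
    rw [prefixC_succ]; simp
  have hlt : (prefixC N c).length + r < (prefixC N (c + 1)).length := by omega
  rw [List.getElem_of_eq hs hk, List.getElem_append_left hlt,
    List.getElem_of_eq (prefixC_succ N c) hlt,
    List.getElem_append_right (by omega)]
  simp

-- A's buffer loop: the result is the concatenated stream of some j ≤ t*m numbers, and it always
-- covers at least t*m characters
theorem solDp_spec {N : Nat} (hN2 : 2 ≤ N) (TM : Nat) (hS : N ≤ 16 ∨ TM ≤ 16)
    (hTM : TM ≤ N ^ 100) :
    ∀ (L a : Nat), a + L = TM →
      ∃ j, j ≤ TM ∧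
        solDp (N : Int) (TM : Int) ((List.range' a L).map (Nat.cast : Nat → Int)) (prefixC N a)
          = prefixC N j ∧ TM ≤ (prefixC N j).length := by
  intro L
  induction L with
  | zero =>
    intro a ha
    refine ⟨TM, le_rfl, ?_, ?_⟩
    · have : a = TM := by omega
      subst this; rfl
    · exact self_le_length_prefixC N TM
  | succ L ih =>
    intro a ha
    rw [List.range'_succ, List.map_cons]
    by_cases hbr : TM < (prefixC N a).length
    · refine ⟨a, by omega, ?_, by omega⟩
      simp only [solDp]
      rw [if_pos (by exact_mod_cast hbr)]
    · have hstep : solDp (N : Int) (TM : Int)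
          ((a : Int) :: (List.range' (a + 1) L).map (Nat.cast : Nat → Int)) (prefixC N a)
          = solDp (N : Int) (TM : Int) ((List.range' (a + 1) L).map (Nat.cast : Nat → Int))
              (prefixC N (a + 1)) := by
        simp only [solDp]
        rw [if_neg (by exact_mod_cast hbr)]
        congr 1
        rw [solDigits_eq_dL hN2 solDic_getD 99 a _ (by omega) (by
          have : a < N ^ 100 := by omega
          simpa using this)]
        rw [List.append_nil, join_singleton_chars, ← prefixC_succ]
      rw [hstep]
      exact ih (a + 1) (by omega)

-- Int/Nat bridge for B's walk
theorem altWalk_cast {N : Nat} (hN : 1 ≤ N) :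
    ∀ (f : Nat) (k d first count : Nat),
      altWalk (N : Int) f (k : Int) (d : Int) (first : Int) (count : Int)
        = (((walkN N f k d first count).1 : Int), ((walkN N f k d first count).2.1 : Int),
           ((walkN N f k d first count).2.2 : Int)) := by
  intro f
  induction f with
  | zero => intro k d first count; rfl
  | succ f ih =>
    intro k d first count
    simp only [altWalk, walkN]
    by_cases hlt : k < d * count
    · rw [if_pos (by exact_mod_cast hlt), if_pos hlt]
    · rw [if_neg (by exact_mod_cast hlt), if_neg hlt]
      have hle : d * count ≤ k := Nat.le_of_not_lt hlt
      have h1 : (k : Int) - (d : Int) * (count : Int) = ((k - d * count : Nat) : Int) := by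
        push_cast [hle]; ring
      have h2 : (d : Int) + 1 = ((d + 1 : Nat) : Int) := by push_cast; ring
      have h3 : ((d : Int)).toNat = d := Int.toNat_natCast d
      have h4 : (N : Int) ^ d = ((N ^ d : Nat) : Int) := by push_cast; ring
      have h5 : ((N : Int) - 1) * ((N ^ d : Nat) : Int) = (((N - 1) * N ^ d : Nat) : Int) := by
        push_cast [hN]; ring
      rw [h1, h2, h3, h4, h5]
      exact ih _ _ _ _

-- B's whole per-position computation returns exactly the stream character
theorem elem_eq {N : Nat} (hN2 : 2 ≤ N) {j kN : Nat} (hS : N ≤ 16 ∨ j ≤ 16) (hj : j ≤ N ^ 100)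
    (hk : kN < (prefixC N j).length) :
    (PySem.Str.pyGet? "0123456789ABCDEF"
      (PySem.Int.mod
        (PySem.Int.floordiv
          ((altWalk (N : Int) 100 (kN : Int) 1 0 (N : Int)).2.2
            + PySem.Int.floordiv (altWalk (N : Int) 100 (kN : Int) 1 0 (N : Int)).1
                (altWalk (N : Int) 100 (kN : Int) 1 0 (N : Int)).2.1)
          ((N : Int) ^ ((altWalk (N : Int) 100 (kN : Int) 1 0 (N : Int)).2.1 - 1
            - PySem.Int.mod (altWalk (N : Int) 100 (kN : Int) 1 0 (N : Int)).1
                (altWalk (N : Int) 100 (kN : Int) 1 0 (N : Int)).2.1).toNat))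
        (N : Int))).getD ' '
    = (prefixC N j)[kN] := by
  obtain ⟨c, r, hcj, hr, hkeq⟩ := exists_decomp j kN hk
  subst hkeq
  have hc100 : c < N ^ 100 := by omega
  have hD1 : 1 ≤ (dL N c).length := dL_length_pos
  have hfl : blockFirst N (dL N c).length ≤ c := (length_prefixC_eq hN2 c).1
  have hwn : walkN N 100 ((prefixC N c).length + r) 1 0 N
      = ((c - blockFirst N (dL N c).length) * (dL N c).length + r,
         (dL N c).length, blockFirst N (dL N c).length) :=
    walkN_at hN2 c r hr hc100
  have hw := altWalk_cast (N := N) (by omega) 100 ((prefixC N c).length + r) 1 0 N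
  rw [hwn] at hw
  simp only [Nat.cast_one, Nat.cast_zero] at hw
  rw [hw]
  have hdiv : ((c - blockFirst N (dL N c).length) * (dL N c).length + r) / (dL N c).length
      = c - blockFirst N (dL N c).length := by
    rw [Nat.mul_comm (c - blockFirst N (dL N c).length) ((dL N c).length),
      Nat.mul_add_div (by omega)]
    have : r / (dL N c).length = 0 := Nat.div_eq_of_lt hr
    omega
  have hmod : ((c - blockFirst N (dL N c).length) * (dL N c).length + r) % (dL N c).length
      = r := by
    rw [Nat.mul_comm (c - blockFirst N (dL N c).length) ((dL N c).length), Nat.mul_add_mod]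
    exact Nat.mod_eq_of_lt hr
  simp only [PySem.Int.floordiv_natCast, PySem.Int.mod_natCast, hdiv, hmod]
  have hnum : ((blockFirst N (dL N c).length : Nat) : Int)
      + ((c - blockFirst N (dL N c).length : Nat) : Int) = ((c : Nat) : Int) := by
    push_cast [hfl]; ring
  rw [hnum]
  have hexp : (((dL N c).length : Int) - 1 - (r : Int))
      = (((dL N c).length - 1 - r : Nat) : Int) := by omega
  rw [hexp, Int.toNat_natCast]
  rw [show ((N : Int) ^ ((dL N c).length - 1 - r))
      = ((N ^ ((dL N c).length - 1 - r) : Nat) : Int) from by push_cast; ring]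
  simp only [PySem.Int.floordiv_natCast, PySem.Int.mod_natCast]
  have hv : c / N ^ ((dL N c).length - 1 - r) % N < 16 := by
    rcases hS with h16 | h16
    · exact lt_of_lt_of_le (Nat.mod_lt _ (by omega)) h16
    · have h1 := Nat.mod_le (c / N ^ ((dL N c).length - 1 - r)) N
      have h2 := Nat.div_le_self c (N ^ ((dL N c).length - 1 - r))
      omega
  rw [hexStr_get _ hv, prefixC_getElem hN2 hcj hr hk, dL_getElem hN2 c r hr]

-- ===== VERDICT (by name: the statement is the Claim_ definition above) =====
theorem solution_spec : Claim_equal_solution := by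
  unfold Claim_equal_solution
  intro n t m p hdom hpre
  unfold Spec_solution solution solution_alt
  rcases hpre with ⟨hn2, hn16, ht, hm, hp1, hpm⟩ | ⟨ht, _hm⟩
  · -- main case: 2 ≤ n ≤ 16, t ≥ 1, 1 ≤ p ≤ m
    obtain ⟨N, rfl⟩ : ∃ N : Nat, n = (N : Int) :=
      ⟨n.toNat, (Int.toNat_of_nonneg (by omega)).symm⟩
    obtain ⟨T, rfl⟩ : ∃ T : Nat, t = (T : Int) :=
      ⟨t.toNat, (Int.toNat_of_nonneg (by omega)).symm⟩
    obtain ⟨M, rfl⟩ : ∃ M : Nat, m = (M : Int) :=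
      ⟨m.toNat, (Int.toNat_of_nonneg (by omega)).symm⟩
    obtain ⟨P, rfl⟩ : ∃ P : Nat, p = (P : Int) :=
      ⟨p.toNat, (Int.toNat_of_nonneg (by omega)).symm⟩
    have hN2 : 2 ≤ N := by exact_mod_cast hn2
    have hS : N ≤ 16 ∨ T * M ≤ 16 := by
      rcases hn16 with h16 | h16
      · exact Or.inl (by exact_mod_cast h16)
      · refine Or.inr ?_
        have : ((T * M : Nat) : Int) ≤ 16 := by push_cast; push_cast at h16; omega
        exact_mod_cast this
    have hT1 : 1 ≤ T := by exact_mod_cast ht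
    have hP1 : 1 ≤ P := by exact_mod_cast hp1
    have hPM : P ≤ M := by exact_mod_cast hpm
    have hM1 : 1 ≤ M := by omega
    simp only [Dom_solution, pvDomInt, Bool.and_eq_true, decide_eq_true_eq] at hdom
    have hT31 : T ≤ 2147483648 := by exact_mod_cast hdom.1.1.2.2
    have hM31 : M ≤ 2147483648 := by exact_mod_cast hdom.1.2.2
    have hTM100 : T * M ≤ N ^ 100 := by
      have h1 : T * M ≤ 2147483648 * 2147483648 := Nat.mul_le_mul hT31 hM31
      have h2 : (2147483648 : Nat) * 2147483648 < 2 ^ 100 := by norm_num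
      have h3 : (2 : Nat) ^ 100 ≤ N ^ 100 := Nat.pow_le_pow_left hN2 100
      omega
    -- A's buffer
    have hcast : (T : Int) * (M : Int) = ((T * M : Nat) : Int) := by push_cast; ring
    rw [hcast]
    obtain ⟨j, hjle, hdp, hcov⟩ := solDp_spec hN2 (T * M) hS hTM100 (T * M) 0 (by omega)
    have hdp2 : solDp (N : Int) ((T * M : Nat) : Int)
        ((List.range (T * M)).map (fun k => ((k : Nat) : Int))) ([] : List Char)
        = prefixC N j := by
      rw [List.range_eq_range']
      exact hdp
    -- both answer loops, as maps over range T
    simp only [PySem.List.pyRange_zero_natCast, PySem.List.foldl_append_singleton_eq_map,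
      List.nil_append, List.map_map]
    rw [hdp2]
    congr 1
    refine List.map_congr_left ?_
    intro i hi
    have hiT : i < T := List.mem_range.mp hi
    simp only [Function.comp_def]
    have hidx : (i : Int) * (M : Int) + (P : Int) - 1 = ((i * M + (P - 1) : Nat) : Int) := by
      push_cast [hP1]; ring_nf
    have hkTM : i * M + (P - 1) < T * M := by
      have h1 : i * M + (P - 1) < (i + 1) * M := by
        have hx : (i + 1) * M = i * M + M := by ring
        omega
      have h2 : (i + 1) * M ≤ T * M := Nat.mul_le_mul_right M (by omega)
      omega
    have hklen : i * M + (P - 1) < (prefixC N j).length := by omega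
    rw [hidx]
    rw [elem_eq hN2 (by omega) (by omega) hklen]
    rw [PySem.List.pyGetD_natCast, List.getD_eq_getElem (prefixC N j) ' ' hklen]
  · -- empty case: t ≤ 0, both loops run zero times
    rw [PySem.List.pyRange_one_eq_nil ht]
    rfl
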